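-- pv_equiv track=rewrite | github.com/SzymonPajzert/koryta | util/set_auth_claims.py | get_custom_claims_dict
-- ===== SOURCE A (Python) =====
-- from enum import IntEnum
--
-- class Level(IntEnum):
--     UNKNOWN = 0
--     NORMAL = 1
--     ADMIN = 2
--
-- def get_custom_claims_dict(l: Level):
--     c = Level.UNKNOWN
--     result = {}
--     while int(c) <= int(l):
--         if c == Level.ADMIN:
--             result["admin"] = True
--         c = c + 1
--     return result
-- ===== SOURCE B (Python) =====
-- from enum import IntEnum
--
-- class Level(IntEnum):
--     UNKNOWN = 0
--     NORMAL = 1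
--     ADMIN = 2
--
-- def get_custom_claims_dict(l: Level):
--     return {"admin": True} if int(l) >= int(Level.ADMIN) else {}
-- ===== Notes on version B (the rewrite author's own statement) =====
-- stated objective: faster
-- what changed: Replaced the enum-counting while-loop that inserts the admin flag when the counter passes ADMIN with a single closed-form conditional testing int(l) >= int(Level.ADMIN), removing the O(l) iteration.
import Mathlib
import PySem

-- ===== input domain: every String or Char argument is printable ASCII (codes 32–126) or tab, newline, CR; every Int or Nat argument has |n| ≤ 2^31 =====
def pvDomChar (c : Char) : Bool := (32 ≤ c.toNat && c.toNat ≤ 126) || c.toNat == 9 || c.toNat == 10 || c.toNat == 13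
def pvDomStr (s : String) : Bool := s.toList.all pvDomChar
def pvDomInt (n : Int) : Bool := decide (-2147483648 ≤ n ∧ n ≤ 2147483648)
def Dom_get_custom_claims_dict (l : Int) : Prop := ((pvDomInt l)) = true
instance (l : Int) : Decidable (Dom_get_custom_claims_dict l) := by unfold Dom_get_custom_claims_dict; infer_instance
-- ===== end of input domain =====

-- B replaces A's while-loop counting an enum up to l with one closed-form conditional on l (simpler).

-- ===== PORT A =====
-- literal port of A's while-loop: counter c starts at UNKNOWN (0), runs while int(c) <= int(l),
-- inserting "admin" into the dict when c == ADMIN (2). The loop executes exactly (l + 1).toNat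
-- times, which is the fuel of this structural recursion (the fuel only makes the loop total).
def get_custom_claims_dict_loop (fuel : Nat) (l c : Int) (result : PySem.Dict String Bool) :
    PySem.Dict String Bool :=
  match fuel with
  | 0 => result
  | fuel + 1 =>
    if c ≤ l then
      get_custom_claims_dict_loop fuel l (c + 1)
        (if c = 2 then result.insert "admin" true else result)
    else result

def get_custom_claims_dict (l : Int) : List (String × Bool) :=
  (get_custom_claims_dict_loop (l + 1).toNat l 0 PySem.Dict.empty).items

-- ===== PORT B =====
def get_custom_claims_dict_alt (l : Int) : List (String × Bool) :=
  if 2 ≤ l then [("admin", true)] else []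

-- ===== PRECONDITION & SPEC =====
def Spec_get_custom_claims_dict (l : Int) (out : List (String × Bool)) : Prop := out = get_custom_claims_dict_alt l
instance (l : Int) (out : List (String × Bool)) : Decidable (Spec_get_custom_claims_dict l out) := by unfold Spec_get_custom_claims_dict; infer_instance

-- ===== CLAIM (what is proved, stated in full; the proofs are below) =====
def Claim_equal_get_custom_claims_dict : Prop := ∀ (l : Int), Dom_get_custom_claims_dict l → Spec_get_custom_claims_dict l (get_custom_claims_dict l)

-- ===== LEMMAS AND PROOFS =====

-- once the counter has passed 2, the loop never touches the accumulator again
theorem loop_past_admin (fuel : Nat) (l c : Int) (acc : PySem.Dict String Bool) (h : 2 < c) :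
    get_custom_claims_dict_loop fuel l c acc = acc := by
  induction fuel generalizing c acc with
  | zero => rfl
  | succ n ih =>
    simp only [get_custom_claims_dict_loop]
    split
    · rw [if_neg (by omega : ¬ c = 2), ih (c + 1) acc (by omega)]
    · rfl

-- ===== VERDICT (by name: the statement is the Claim_ definition above) =====
theorem get_custom_claims_dict_spec : Claim_equal_get_custom_claims_dict := by
  intro l _
  unfold Spec_get_custom_claims_dict get_custom_claims_dict get_custom_claims_dict_alt
  rcases lt_trichotomy l 0 with hneg | rfl | hpos
  · rw [show (l + 1).toNat = 0 by omega]
    simp [get_custom_claims_dict_loop, PySem.Dict.empty, show ¬ (2:Int) ≤ l by omega]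
  · decide
  · rcases eq_or_lt_of_le (by omega : (1:Int) ≤ l) with rfl | h2
    · decide
    · rw [show (l + 1).toNat = (l - 2).toNat + 3 by omega]
      simp only [get_custom_claims_dict_loop,
        if_pos (by omega : (0:Int) ≤ l), if_pos (by omega : (0:Int) + 1 ≤ l),
        if_pos (by omega : (0:Int) + 1 + 1 ≤ l)]
      norm_num
      rw [loop_past_admin _ l _ _ (by omega)]
      simp [PySem.Dict.empty, PySem.Dict.insert, show (2:Int) ≤ l by omega]
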